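-- pv_equiv track=rewrite | github.com/phoneee/dqix | dqix/probes/email/dkim.py | _parse_dkim_record
-- ===== SOURCE A (Python) =====
-- from typing import Tuple, Dict, Any, List, Optional
--
-- def _parse_dkim_record(record: str) -> tuple[Optional[str], Optional[str], Optional[int]]:
--     """Parse DKIM record.
--
--     Args:
--         record: DKIM record
--
--     Returns:
--         Tuple of (public_key, key_type, key_size)
--     """
--     public_key = None
--     key_type = None
--     key_size = None
--
--     # Split record into parts
--     parts = record.split(';')
--
--     for part in parts:
--         part = part.strip()
--         if part.startswith('p='):
--             public_key = part[2:]
--         elif part.startswith('k='):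
--             key_type = part[2:]
--         elif part.startswith('s='):
--             key_size = int(part[2:])
--
--     return public_key, key_type, key_size
-- ===== SOURCE B (Python) =====
-- from typing import Optional
--
-- def _parse_dkim_record(record: str) -> tuple[Optional[str], Optional[str], Optional[int]]:
--     """Parse DKIM record into (public_key, key_type, key_size)."""
--     fields = {}
--     for part in record.split(';'):
--         part = part.strip()
--         i = part.find('=')
--         if i != -1:
--             fields[part[:i]] = part[i + 1:]
--     return (fields.get('p'), fields.get('k'),
--             int(fields['s']) if 's' in fields else None)
-- ===== Notes on version B (the rewrite author's own statement) =====
-- stated objective: idiomatic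
-- what changed: B builds a dict of all key=value fields in one pass (splitting each part at the first '=') and then reads the 'p', 'k' and 's' entries, instead of A's branch-per-field-name assignments inside the loop.
import Mathlib
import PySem

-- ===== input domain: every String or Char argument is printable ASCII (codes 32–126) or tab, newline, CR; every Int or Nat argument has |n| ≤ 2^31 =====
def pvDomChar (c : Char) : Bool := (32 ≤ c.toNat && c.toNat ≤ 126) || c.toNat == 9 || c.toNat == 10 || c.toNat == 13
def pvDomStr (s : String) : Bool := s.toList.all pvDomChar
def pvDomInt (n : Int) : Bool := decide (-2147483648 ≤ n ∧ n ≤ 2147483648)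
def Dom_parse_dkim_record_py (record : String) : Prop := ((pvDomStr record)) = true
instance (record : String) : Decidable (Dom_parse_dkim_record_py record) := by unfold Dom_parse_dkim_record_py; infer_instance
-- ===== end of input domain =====

-- B builds a dict of all "key=value" fields in one pass, then reads the three entries, instead of
-- a branch per field name inside the loop (objective: more idiomatic; same cost).


-- ===== PORT A =====
-- int(part[2:]) is ported as PySem.Int.ofStr?; the `none` case is Python's ValueError,
-- excluded by Pre_parse_dkim_record_py below.
def pvStepA (acc : Option String × Option String × Option Int) (part0 : String) :
    Option String × Option String × Option Int :=
  let part := PySem.Str.strip part0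
  if PySem.Str.startswith part "p=" then
    (some (PySem.Str.slice part (some 2) none), acc.2.1, acc.2.2)
  else if PySem.Str.startswith part "k=" then
    (acc.1, some (PySem.Str.slice part (some 2) none), acc.2.2)
  else if PySem.Str.startswith part "s=" then
    (acc.1, acc.2.1, PySem.Int.ofStr? (PySem.Str.slice part (some 2) none))
  else acc

def parse_dkim_record_py (record : String) : Option String × Option String × Option Int :=
  let parts := (PySem.Str.split? record ";").getD []
  parts.foldl pvStepA (none, none, none)

-- ===== PORT B =====
-- int(fields['s']) is ported as PySem.Int.ofStr?; the `none` case is Python's ValueError,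
-- excluded by Pre_parse_dkim_record_py below.
def pvStepB (d : PySem.Dict String String) (part0 : String) : PySem.Dict String String :=
  let part := PySem.Str.strip part0
  let i := PySem.Str.find part "="
  if i ≠ -1 then
    d.insert (PySem.Str.slice part none (some i)) (PySem.Str.slice part (some (i + 1)) none)
  else d

def parse_dkim_record_py_alt (record : String) : Option String × Option String × Option Int :=
  let fields := ((PySem.Str.split? record ";").getD []).foldl pvStepB (PySem.Dict.mk [])
  (fields.get? "p", fields.get? "k",
   match fields.get? "s" with
   | some v => PySem.Int.ofStr? v
   | none => none)

-- ===== PRECONDITION & SPEC =====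
-- Pre_ excludes exactly the records on which Python A raises ValueError: a part whose stripped
-- form starts with "s=" but whose remainder is not a valid int literal.
def Pre_parse_dkim_record_py (record : String) : Prop :=
  ∀ part ∈ (PySem.Str.split? record ";").getD [],
    PySem.Str.startswith (PySem.Str.strip part) "s=" = true →
    (PySem.Int.ofStr? (PySem.Str.slice (PySem.Str.strip part) (some 2) none)).isSome = true
instance (record : String) : Decidable (Pre_parse_dkim_record_py record) := by
  unfold Pre_parse_dkim_record_py; infer_instance

def pvWitness_parse_dkim_record_py : String := "v=DKIM1; k=rsa; s=1024; p=MIGf"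

def Spec_parse_dkim_record_py (record : String) (out : Option String × Option String × Option Int) : Prop := out = parse_dkim_record_py_alt record
instance (record : String) (out : Option String × Option String × Option Int) : Decidable (Spec_parse_dkim_record_py record out) := by unfold Spec_parse_dkim_record_py; infer_instance

-- ===== CLAIM (what is proved, stated in full; the proofs are below) =====
def Claim_equal_parse_dkim_record_py : Prop := ∀ (record : String), Dom_parse_dkim_record_py record → Pre_parse_dkim_record_py record → Spec_parse_dkim_record_py record (parse_dkim_record_py record)

-- ===== LEMMAS AND PROOFS =====

theorem pvGo (l : List Char) (k : Nat) :
    PySem.Chars.find.go ['='] l k = (match l.findIdx? (fun c => c == '=') with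
      | some n => ((k + n : Nat) : Int) | none => -1) := by
  induction l generalizing k with
  | nil => simp [PySem.Chars.find.go]
  | cons c t ih =>
    rw [PySem.Chars.find.go]
    by_cases hc : c = '='
    · subst hc; simp [List.isPrefixOf, List.findIdx?_cons]
    · have hc' : ¬('=' = c) := fun h => hc h.symm
      cases h : t.findIdx? (fun c => c == '=') with
      | none => simp [List.isPrefixOf, hc, hc', List.findIdx?_cons, ih, h]
      | some n =>
        simp only [List.isPrefixOf, List.findIdx?_cons, ih, h, beq_iff_eq, hc,
          if_false, Bool.and_true, Option.map_some]
        simp [hc']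
        ring

theorem pvFindEq (l : List Char) :
    PySem.Chars.find l ['='] = (match l.findIdx? (fun c => c == '=') with
      | some n => (n : Int) | none => -1) := by
  rw [PySem.Chars.find, pvGo]; simp

theorem pvSW_iff (t : String) (c0 : Char) (p : String) (hp : p.toList = [c0, '=']) :
    PySem.Str.startswith t p = true ↔ ∃ u, t.toList = c0 :: '=' :: u := by
  rw [PySem.Str.startswith_eq, hp]
  show List.isPrefixOf _ _ = true ↔ _
  rw [List.isPrefixOf_iff_prefix]
  constructor
  · intro h
    rcases List.cons_prefix_iff.mp h with ⟨l', hl', h2⟩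
    rcases List.cons_prefix_iff.mp h2 with ⟨u, hu, _⟩
    exact ⟨u, by rw [hl', hu]⟩
  · rintro ⟨u, hu⟩
    rw [hu]
    exact ⟨u, rfl⟩

theorem pvKey_iff (l : List Char) (n : Nat) (h : List.findIdx? (fun c => c == '=') l = some n)
    (c0 : Char) (hc0 : c0 ≠ '=') :
    l.take n = [c0] ↔ ∃ u, l = c0 :: '=' :: u := by
  constructor
  · intro hk
    have hn : n < l.length := (List.findIdx?_eq_some_iff_findIdx_eq.mp h).1
    have hlen : (l.take n).length = 1 := by rw [hk]; rfl
    have hn1 : n = 1 := by simp [List.length_take] at hlen; omega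
    subst hn1
    cases l with
    | nil => simp at hn
    | cons a rest =>
      have ha : a = c0 := by simpa using congrArg (fun x => x.head?) hk
      cases rest with
      | nil => simp at hn
      | cons b u =>
        have h' : List.findIdx? (fun c => c == '=') (a :: b :: u) = some 1 := h
        rw [List.findIdx?_cons] at h'
        have haeq : (a == '=') = false := by simp [ha, hc0]
        simp only [haeq, Bool.false_eq_true, if_false] at h'
        rw [List.findIdx?_cons] at h'
        by_cases hb : b = '='
        · exact ⟨u, by rw [ha, hb]⟩
        · have hbeq : (b == '=') = false := by simp [hb]
          simp only [hbeq, Bool.false_eq_true, if_false, Option.map_map] at h'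
          cases hfi : List.findIdx? (fun c => c == '=') u with
          | none => rw [hfi] at h'; simp at h'
          | some m => rw [hfi] at h'; simp at h'
  · rintro ⟨u, hu⟩
    have h1 : List.findIdx? (fun c => c == '=') l = some 1 := by
      subst hu; simp [List.findIdx?_cons, hc0]
    rw [h] at h1
    obtain rfl : n = 1 := Option.some.inj h1
    subst hu; rfl

theorem pvStrOfToList (s : String) (u : List Char) (h : s.toList = u) : s = String.ofList u := by
  subst h; simp

def pvRead (d : PySem.Dict String String) : Option String × Option String × Option Int :=
  (d.get? "p", d.get? "k",
   match d.get? "s" with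
   | some v => PySem.Int.ofStr? v
   | none => none)

theorem pvBranch_p (d : PySem.Dict String String) (v : String) :
    pvRead (d.insert "p" v) = (some v, (pvRead d).2.1, (pvRead d).2.2) := by
  unfold pvRead
  rw [PySem.Dict.get?_insert_self,
    PySem.Dict.get?_insert_of_ne _ _ (by decide : ("k" : String) ≠ "p"),
    PySem.Dict.get?_insert_of_ne _ _ (by decide : ("s" : String) ≠ "p")]

theorem pvBranch_k (d : PySem.Dict String String) (v : String) :
    pvRead (d.insert "k" v) = ((pvRead d).1, some v, (pvRead d).2.2) := by
  unfold pvRead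
  rw [PySem.Dict.get?_insert_self,
    PySem.Dict.get?_insert_of_ne _ _ (by decide : ("p" : String) ≠ "k"),
    PySem.Dict.get?_insert_of_ne _ _ (by decide : ("s" : String) ≠ "k")]

theorem pvBranch_s (d : PySem.Dict String String) (v : String) :
    pvRead (d.insert "s" v) = ((pvRead d).1, (pvRead d).2.1, PySem.Int.ofStr? v) := by
  unfold pvRead
  rw [PySem.Dict.get?_insert_self,
    PySem.Dict.get?_insert_of_ne _ _ (by decide : ("p" : String) ≠ "s"),
    PySem.Dict.get?_insert_of_ne _ _ (by decide : ("k" : String) ≠ "s")]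

theorem pvBranch_other (d : PySem.Dict String String) (key v : String)
    (hp : key ≠ "p") (hk : key ≠ "k") (hs : key ≠ "s") :
    pvRead (d.insert key v) = pvRead d := by
  unfold pvRead
  rw [PySem.Dict.get?_insert_of_ne _ _ (Ne.symm hp),
    PySem.Dict.get?_insert_of_ne _ _ (Ne.symm hk),
    PySem.Dict.get?_insert_of_ne _ _ (Ne.symm hs)]

theorem pvStep_agree (d : PySem.Dict String String) (part0 : String) :
    pvRead (pvStepB d part0) = pvStepA (pvRead d) part0 := by
  unfold pvStepA pvStepB
  dsimp only
  set t := PySem.Str.strip part0 with ht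
  have hfind : PySem.Str.find t "=" = (match t.toList.findIdx? (fun c => c == '=') with
      | some n => (n : Int) | none => -1) := by
    rw [PySem.Str.find_eq]; exact pvFindEq t.toList
  cases h : t.toList.findIdx? (fun c => c == '=') with
  | none =>
    have hnone : ∀ c ∈ t.toList, (c == '=') = false := List.findIdx?_eq_none_iff.mp h
    have hsw : ∀ (c0 : Char) (p : String), p.toList = [c0, '='] →
        PySem.Str.startswith t p = false := by
      intro c0 p hp
      rw [Bool.eq_false_iff]
      intro hswt
      rcases (pvSW_iff t c0 p hp).mp hswt with ⟨u, hu⟩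
      have := hnone '=' (by rw [hu]; simp)
      simp at this
    have hi : PySem.Str.find t "=" = -1 := by rw [hfind, h]
    rw [if_neg (not_not_intro hi), hsw 'p' "p=" rfl, hsw 'k' "k=" rfl, hsw 's' "s=" rfl]
    simp only [Bool.false_eq_true, if_false]
  | some n =>
    have hi : PySem.Str.find t "=" = (n : Int) := by rw [hfind, h]
    have hne : ¬(PySem.Str.find t "=" = -1) := by rw [hi]; omega
    rw [if_pos hne]
    have hkeyl : (PySem.Str.slice t none (some (PySem.Str.find t "="))).toList
        = t.toList.take n := by
      rw [PySem.Str.toList_slice, hi, PySem.Chars.slice_eq_listSlice,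
        PySem.List.slice_to _ (by omega)]
      simp
    by_cases hkp : t.toList.take n = ['p']
    · rcases (pvKey_iff _ _ h 'p' (by decide)).mp hkp with ⟨u, hu⟩
      obtain rfl : n = 1 := by
        have h1 : t.toList.findIdx? (fun c => c == '=') = some 1 := by
          rw [hu]; simp [List.findIdx?_cons]
        rw [h] at h1; exact Option.some.inj h1
      have hswp : PySem.Str.startswith t "p=" = true := (pvSW_iff t 'p' "p=" rfl).mpr ⟨u, hu⟩
      have hkey : PySem.Str.slice t none (some (PySem.Str.find t "=")) = "p" := by
        have := pvStrOfToList _ _ (hkeyl.trans hkp)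
        simpa using this
      have hv2 : PySem.Str.slice t (some (PySem.Str.find t "=" + 1)) none
          = PySem.Str.slice t (some 2) none := by rw [hi]; norm_num
      rw [hswp, if_pos rfl, hkey, hv2, pvBranch_p]
    · by_cases hkk : t.toList.take n = ['k']
      · rcases (pvKey_iff _ _ h 'k' (by decide)).mp hkk with ⟨u, hu⟩
        obtain rfl : n = 1 := by
          have h1 : t.toList.findIdx? (fun c => c == '=') = some 1 := by
            rw [hu]; simp [List.findIdx?_cons]
          rw [h] at h1; exact Option.some.inj h1
        have hswp : PySem.Str.startswith t "p=" = false := by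
          rw [Bool.eq_false_iff]; intro hx
          exact hkp ((pvKey_iff _ _ h 'p' (by decide)).mpr ((pvSW_iff t 'p' "p=" rfl).mp hx))
        have hswk : PySem.Str.startswith t "k=" = true := (pvSW_iff t 'k' "k=" rfl).mpr ⟨u, hu⟩
        have hkey : PySem.Str.slice t none (some (PySem.Str.find t "=")) = "k" := by
          have := pvStrOfToList _ _ (hkeyl.trans hkk)
          simpa using this
        have hv2 : PySem.Str.slice t (some (PySem.Str.find t "=" + 1)) none
            = PySem.Str.slice t (some 2) none := by rw [hi]; norm_num
        rw [hswp, hswk, hkey, hv2, pvBranch_k]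
        simp only [Bool.false_eq_true, if_false, if_true]
      · by_cases hks : t.toList.take n = ['s']
        · rcases (pvKey_iff _ _ h 's' (by decide)).mp hks with ⟨u, hu⟩
          obtain rfl : n = 1 := by
            have h1 : t.toList.findIdx? (fun c => c == '=') = some 1 := by
              rw [hu]; simp [List.findIdx?_cons]
            rw [h] at h1; exact Option.some.inj h1
          have hswp : PySem.Str.startswith t "p=" = false := by
            rw [Bool.eq_false_iff]; intro hx
            exact hkp ((pvKey_iff _ _ h 'p' (by decide)).mpr ((pvSW_iff t 'p' "p=" rfl).mp hx))
          have hswk : PySem.Str.startswith t "k=" = false := by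
            rw [Bool.eq_false_iff]; intro hx
            exact hkk ((pvKey_iff _ _ h 'k' (by decide)).mpr ((pvSW_iff t 'k' "k=" rfl).mp hx))
          have hsws : PySem.Str.startswith t "s=" = true := (pvSW_iff t 's' "s=" rfl).mpr ⟨u, hu⟩
          have hkey : PySem.Str.slice t none (some (PySem.Str.find t "=")) = "s" := by
            have := pvStrOfToList _ _ (hkeyl.trans hks)
            simpa using this
          have hv2 : PySem.Str.slice t (some (PySem.Str.find t "=" + 1)) none
              = PySem.Str.slice t (some 2) none := by rw [hi]; norm_num
          rw [hswp, hswk, hsws, hkey, hv2, pvBranch_s]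
          simp only [Bool.false_eq_true, if_false, if_true]
        · have hswp : PySem.Str.startswith t "p=" = false := by
            rw [Bool.eq_false_iff]; intro hx
            exact hkp ((pvKey_iff _ _ h 'p' (by decide)).mpr ((pvSW_iff t 'p' "p=" rfl).mp hx))
          have hswk : PySem.Str.startswith t "k=" = false := by
            rw [Bool.eq_false_iff]; intro hx
            exact hkk ((pvKey_iff _ _ h 'k' (by decide)).mpr ((pvSW_iff t 'k' "k=" rfl).mp hx))
          have hsws : PySem.Str.startswith t "s=" = false := by
            rw [Bool.eq_false_iff]; intro hx
            exact hks ((pvKey_iff _ _ h 's' (by decide)).mpr ((pvSW_iff t 's' "s=" rfl).mp hx))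
          have hkeyne : ∀ (s0 : String), s0.toList ≠ t.toList.take n →
              PySem.Str.slice t none (some (PySem.Str.find t "=")) ≠ s0 := by
            intro s0 hs0 he
            exact hs0 (by rw [← he, hkeyl])
          rw [hswp, hswk, hsws,
            pvBranch_other _ _ _ (fun he => hkeyne "p" (fun hx => hkp hx.symm) he)
              (fun he => hkeyne "k" (fun hx => hkk hx.symm) he)
              (fun he => hkeyne "s" (fun hx => hks hx.symm) he)]
          simp only [Bool.false_eq_true, if_false]

theorem pvLoop_agree (parts : List String) (d : PySem.Dict String String) :
    pvRead (parts.foldl pvStepB d) = parts.foldl pvStepA (pvRead d) := by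
  induction parts generalizing d with
  | nil => rfl
  | cons p ps ih => simp only [List.foldl_cons, ih, pvStep_agree]

-- ===== VERDICT (by name: the statement is the Claim_ definition above) =====
theorem parse_dkim_record_py_spec : Claim_equal_parse_dkim_record_py := by
  intro record _ _
  show _ = parse_dkim_record_py_alt record
  unfold parse_dkim_record_py parse_dkim_record_py_alt
  exact (pvLoop_agree ((PySem.Str.split? record ";").getD []) (PySem.Dict.mk [])).symm
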